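-- pv_equiv track=rewrite | github.com/MrBrainiacJ/cognithor | src/cognithor/gateway/gateway.py | _classify_attachments
-- ===== SOURCE A (Python) =====
-- _IMAGE_EXTS = frozenset({".png", ".jpg", ".jpeg", ".webp", ".gif", ".bmp"})
--
-- _VIDEO_EXTS = frozenset({".mp4", ".webm", ".mov", ".mkv", ".avi"})
--
-- def _classify_attachments(
--     attachments: list[str],
-- ) -> tuple[list[str], str | None, list[str]]:
--     """Split an attachment list into images / one video / rejected extra videos.
--
--     Returns:
--         (image_attachments, first_video_or_None, rejected_extra_videos)
--
--     Single-video-per-turn policy (spec Decision 7): the first video in the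
--     list wins; any additional videos go into ``rejected_extra_videos`` so the
--     caller can surface a user-visible validation error.
--     """
--     images: list[str] = []
--     video: str | None = None
--     rejected: list[str] = []
--     for path in attachments:
--         ext = ""
--         if "." in path:
--             ext = "." + path.rsplit(".", 1)[-1].lower()
--         if ext in _IMAGE_EXTS:
--             images.append(path)
--         elif ext in _VIDEO_EXTS:
--             if video is None:
--                 video = path
--             else:
--                 rejected.append(path)
--     return images, video, rejected
-- ===== SOURCE B (Python) =====
-- _IMAGE_EXTS = frozenset({".png", ".jpg", ".jpeg", ".webp", ".gif", ".bmp"})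
--
-- _VIDEO_EXTS = frozenset({".mp4", ".webm", ".mov", ".mkv", ".avi"})
--
--
-- def _ext(path):
--     if "." in path:
--         return "." + path.rsplit(".", 1)[-1].lower()
--     return ""
--
--
-- def _classify_attachments(attachments):
--     images = [p for p in attachments if _ext(p) in _IMAGE_EXTS]
--     videos = [p for p in attachments if _ext(p) in _VIDEO_EXTS]
--     return images, (videos[0] if videos else None), videos[1:]
-- ===== Notes on version B (the rewrite author's own statement) =====
-- stated objective: simpler
-- what changed: Replaces the single stateful loop (running first-video slot plus rejected accumulator) by two filtering comprehensions over a shared extension helper, recovering the first video and the rejected extras by head/slicing of the video list.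
import Mathlib
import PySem

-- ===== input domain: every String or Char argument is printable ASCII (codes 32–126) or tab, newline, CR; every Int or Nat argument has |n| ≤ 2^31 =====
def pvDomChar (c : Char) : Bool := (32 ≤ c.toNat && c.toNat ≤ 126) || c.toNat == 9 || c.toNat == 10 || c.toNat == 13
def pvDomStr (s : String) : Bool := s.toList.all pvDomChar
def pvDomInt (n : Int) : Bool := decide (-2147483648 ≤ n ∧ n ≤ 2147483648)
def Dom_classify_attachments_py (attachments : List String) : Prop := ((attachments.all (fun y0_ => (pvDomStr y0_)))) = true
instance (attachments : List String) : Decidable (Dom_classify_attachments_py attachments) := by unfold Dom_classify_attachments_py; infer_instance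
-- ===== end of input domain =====

-- B replaces A's stateful loop (running first-video slot + rejected accumulator) by two
-- filtering passes plus head/slicing of the video list; objective: simpler.

-- ===== PORT A =====
-- Module constants _IMAGE_EXTS / _VIDEO_EXTS (finite sets of extension strings, held as List Char).
def imageExts : List (List Char) := [".png".toList, ".jpg".toList, ".jpeg".toList, ".webp".toList, ".gif".toList, ".bmp".toList]
def videoExts : List (List Char) := [".mp4".toList, ".webm".toList, ".mov".toList, ".mkv".toList, ".avi".toList]

-- hand-port of A's inline `ext = "." + path.rsplit(".", 1)[-1].lower()` under the guard `"." in path`: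
-- the piece after the LAST '.' is exactly the longest '.'-free suffix, so this is exact.
def extOfA (path : String) : List Char :=
  if PySem.Str.isIn "." path then
    '.' :: PySem.Chars.lower ((path.toList.reverse.takeWhile (fun c => c != '.')).reverse)
  else []

def classify_attachments_py (attachments : List String) : List String × Option String × List String :=
  attachments.foldl (fun st path =>
    let ext := extOfA path
    if imageExts.contains ext then (st.1 ++ [path], st.2.1, st.2.2)
    else if videoExts.contains ext then
      match st.2.1 with
      | none => (st.1, some path, st.2.2)
      | some v => (st.1, some v, st.2.2 ++ [path])
    else st) ([], none, [])

-- ===== PORT B =====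
-- Source B's helper `_ext` (the same expression A computes inline; same hand-port, exact for the same reason).
def extOfB (path : String) : List Char :=
  if PySem.Str.isIn "." path then
    '.' :: PySem.Chars.lower ((path.toList.reverse.takeWhile (fun c => c != '.')).reverse)
  else []

def classify_attachments_py_alt (attachments : List String) : List String × Option String × List String :=
  let images := attachments.filter (fun p => imageExts.contains (extOfB p))
  let videos := attachments.filter (fun p => videoExts.contains (extOfB p))
  (images, videos.head?, videos.drop 1)

-- ===== PRECONDITION & SPEC =====
def Spec_classify_attachments_py (attachments : List String) (out : List String × Option String × List String) : Prop := out = classify_attachments_py_alt attachments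
instance (attachments : List String) (out : List String × Option String × List String) : Decidable (Spec_classify_attachments_py attachments out) := by unfold Spec_classify_attachments_py; infer_instance

-- ===== CLAIM (what is proved, stated in full; the proofs are below) =====
def Claim_equal_classify_attachments_py : Prop := ∀ (attachments : List String), Dom_classify_attachments_py attachments → Spec_classify_attachments_py attachments (classify_attachments_py attachments)

-- ===== LEMMAS AND PROOFS =====

-- shorthand predicates for the proofs
def isImg (p : String) : Bool := imageExts.contains (extOfB p)
def isVid (p : String) : Bool := videoExts.contains (extOfB p)

lemma ext_eq (p : String) : extOfA p = extOfB p := rfl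

-- the two extension sets are disjoint
lemma exts_disjoint (e : List Char) (h : imageExts.contains e = true) :
    videoExts.contains e = false := by
  simp [imageExts] at h
  rcases h with rfl | rfl | rfl | rfl | rfl | rfl <;> decide

-- A's loop step
def stepA (st : List String × Option String × List String) (path : String) :
    List String × Option String × List String :=
  let ext := extOfA path
  if imageExts.contains ext then (st.1 ++ [path], st.2.1, st.2.2)
  else if videoExts.contains ext then
    match st.2.1 with
    | none => (st.1, some path, st.2.2)
    | some v => (st.1, some v, st.2.2 ++ [path])
  else st

lemma classify_eq_foldl_stepA (attachments : List String) :
    classify_attachments_py attachments = attachments.foldl stepA ([], none, []) := rfl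

-- loop invariant once a video has been found: every further video is rejected
lemma foldl_stepA_some (xs : List String) : ∀ (images rejected : List String) (v : String),
    xs.foldl stepA (images, some v, rejected) =
      (images ++ xs.filter isImg, some v, rejected ++ xs.filter isVid) := by
  induction xs with
  | nil => intro images rejected v; simp
  | cons p xs ih =>
    intro images rejected v
    by_cases hi : isImg p = true
    · have hv : isVid p = false := exts_disjoint _ hi
      simp [stepA, List.filter_cons, ext_eq, isImg, isVid] at *
      simp [hi, hv, ih]
    · have hi' : isImg p = false := by simpa using hi
      by_cases hv : isVid p = true
      · simp [stepA, List.filter_cons, ext_eq, isImg, isVid] at *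
        simp [hi', hv, ih]
      · have hv' : isVid p = false := by simpa using hv
        simp [stepA, List.filter_cons, ext_eq, isImg, isVid] at *
        simp [hi', hv', ih]

-- loop invariant before any video is found: first video wins, the rest are rejected
lemma foldl_stepA_none (xs : List String) : ∀ (images rejected : List String),
    xs.foldl stepA (images, none, rejected) =
      (images ++ xs.filter isImg, (xs.filter isVid).head?,
        rejected ++ (xs.filter isVid).drop 1) := by
  induction xs with
  | nil => intro images rejected; simp
  | cons p xs ih =>
    intro images rejected
    by_cases hi : isImg p = true
    · have hv : isVid p = false := exts_disjoint _ hi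
      simp [stepA, List.filter_cons, ext_eq, isImg, isVid] at *
      simp [hi, hv, ih]
    · have hi' : isImg p = false := by simpa using hi
      by_cases hv : isVid p = true
      · simp [stepA, List.filter_cons, ext_eq, isImg, isVid] at *
        simp [hi', hv, foldl_stepA_some]
      · have hv' : isVid p = false := by simpa using hv
        simp [stepA, List.filter_cons, ext_eq, isImg, isVid] at *
        simp [hi', hv', ih]

-- ===== VERDICT (by name: the statement is the Claim_ definition above) =====
theorem classify_attachments_py_spec : Claim_equal_classify_attachments_py := by
  intro attachments _
  show classify_attachments_py attachments = classify_attachments_py_alt attachments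
  rw [classify_eq_foldl_stepA, foldl_stepA_none]
  simp only [List.nil_append]
  rfl
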